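-- pv_equiv track=rewrite | github.com/geib7592/fun | fun/aoc2022/day22.py | step
-- ===== SOURCE A (Python) =====
-- DIR = '>v<^'
--
-- def step(row, col, facing, mappa):
--     dx, dy = [(1, 0), (0, 1), (-1, 0), (0, -1)][facing]
--     r_new = (row + dy) % len(mappa)
--     c_new = (col + dx) % len(mappa[r_new])
--     if mappa[r_new][c_new] in DIR+".":
--         return r_new, c_new, False
--     elif mappa[r_new][c_new] == "#":
--         return row, col, True
--     elif mappa[r_new][c_new] == " ":
--         r, c, stuck =  step(r_new, c_new, facing, mappa)
--         if stuck:
--             return row, col, stuck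
--         else:
--             return r, c, stuck
--
--     return
-- ===== SOURCE B (Python) =====
-- DIR = '>v<^'
--
-- def step(row, col, facing, mappa):
--     f = facing % 4
--     if f == 0:
--         dr, dc = 0, 1
--     elif f == 1:
--         dr, dc = 1, 0
--     elif f == 2:
--         dr, dc = 0, -1
--     else:
--         dr, dc = -1, 0
--     r, c = row, col
--     while True:
--         r = (r + dr) % len(mappa)
--         c = (c + dc) % len(mappa[r])
--         ch = mappa[r][c]
--         if ch == ' ':
--             continue
--         if ch == '#':
--             return row, col, True
--         if ch in DIR + '.':
--             return r, c, False
--         return None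
-- ===== Notes on version B (the rewrite author's own statement) =====
-- stated objective: alternative
-- what changed: Replaces A's blank-skipping recursion (whose stuck flag unwinds level by level) with an iterative while-loop that keeps the fixed start coordinates and a moving (r, c) state, and resolves the direction by an if-chain on facing % 4 instead of indexing a tuple list.
import Mathlib
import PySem

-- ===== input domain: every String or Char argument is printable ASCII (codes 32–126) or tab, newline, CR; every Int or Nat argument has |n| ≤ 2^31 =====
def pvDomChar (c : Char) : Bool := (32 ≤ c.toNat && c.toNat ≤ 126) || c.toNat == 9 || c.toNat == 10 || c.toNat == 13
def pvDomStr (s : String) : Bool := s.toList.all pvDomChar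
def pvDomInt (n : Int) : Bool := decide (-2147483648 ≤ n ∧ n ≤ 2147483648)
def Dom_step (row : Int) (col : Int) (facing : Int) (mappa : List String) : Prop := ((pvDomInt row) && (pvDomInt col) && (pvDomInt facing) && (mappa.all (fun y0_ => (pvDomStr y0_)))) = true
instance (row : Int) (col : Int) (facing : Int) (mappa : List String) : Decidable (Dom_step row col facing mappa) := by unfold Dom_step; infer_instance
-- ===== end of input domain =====

-- B rewrites A's blank-skipping recursion as an iterative loop (dir from facing % 4 by an if-chain,
-- fixed start coordinates, loop state (r, c)); same return value, different decomposition.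
-- Both ports are fueled (pvFuel: one unit per visited cell, bound rows + total chars + 1); inside
-- Pre_step the skip path stops within that bound (pigeonhole over the finite wrapped states), and
-- fuel exhaustion never occurs.

-- ===== PORT A =====
def pvFuel (mappa : List String) : Nat := mappa.length + (mappa.map (fun s => s.toList.length)).sum + 1

def stepACore : Nat → Int → Int → Int → List String → Int × Int × Bool
  | 0, _, _, _, _ => (0, 0, false)
  | Nat.succ f, row, col, facing, mappa =>
    match PySem.List.pyGet? [((1 : Int), (0 : Int)), (0, 1), (-1, 0), (0, -1)] facing with
    | none => (0, 0, false)          -- IndexError (excluded by Pre_step)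
    | some (dx, dy) =>
      let rnew := PySem.Int.mod (row + dy) ((mappa.length : Int))
      match PySem.List.pyGet? mappa rnew with
      | none => (0, 0, false)        -- len(mappa) = 0 (ZeroDivisionError in Python; excluded)
      | some srow =>
        let cnew := PySem.Int.mod (col + dx) (PySem.Str.len srow)
        match PySem.Str.pyGet? srow cnew with
        | none => (0, 0, false)      -- empty row (ZeroDivisionError in Python; excluded)
        | some ch =>
          if ['>', 'v', '<', '^', '.'].contains ch then (rnew, cnew, false)
          else if ch = '#' then (row, col, true)
          else if ch = ' ' then
            match stepACore f rnew cnew facing mappa with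
            | (r, c, stuck) => if stuck then (row, col, true) else (r, c, stuck)
          else (0, 0, false)         -- Python's fall-through `return None` (excluded)

def step (row : Int) (col : Int) (facing : Int) (mappa : List String) : Int × Int × Bool :=
  stepACore (pvFuel mappa) row col facing mappa

-- ===== PORT B =====
def stepBLoop : Nat → Int → Int → Int → Int → Int → Int → List String → Int × Int × Bool
  | 0, _, _, _, _, _, _, _ => (0, 0, false)
  | Nat.succ f, dr, dc, row0, col0, r, c, mappa =>
    let rn := PySem.Int.mod (r + dr) ((mappa.length : Int))
    match PySem.List.pyGet? mappa rn with
    | none => (0, 0, false)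
    | some srow =>
      let cn := PySem.Int.mod (c + dc) (PySem.Str.len srow)
      match PySem.Str.pyGet? srow cn with
      | none => (0, 0, false)
      | some ch =>
        if ch = ' ' then stepBLoop f dr dc row0 col0 rn cn mappa
        else if ch = '#' then (row0, col0, true)
        else if ['>', 'v', '<', '^', '.'].contains ch then (rn, cn, false)
        else (0, 0, false)

def step_alt (row : Int) (col : Int) (facing : Int) (mappa : List String) : Int × Int × Bool :=
  let f := PySem.Int.mod facing 4
  if f = 0 then stepBLoop (pvFuel mappa) 0 1 row col row col mappa
  else if f = 1 then stepBLoop (pvFuel mappa) 1 0 row col row col mappa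
  else if f = 2 then stepBLoop (pvFuel mappa) 0 (-1) row col row col mappa
  else stepBLoop (pvFuel mappa) (-1) 0 row col row col mappa

-- ===== PRECONDITION & SPEC =====
-- helpers for Pre_step only (they do not touch the ports)
def pvStop (c : Char) : Bool := ['>', 'v', '<', '^', '.', '#'].contains c
-- (dr, dc) for facing in [-4, 3], Python's negative list indexing included
def pvDelta (facing : Int) : Int × Int :=
  if facing = 0 ∨ facing = -4 then (0, 1)
  else if facing = 1 ∨ facing = -3 then (1, 0)
  else if facing = 2 ∨ facing = -2 then (0, -1)
  else (-1, 0)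
def pvRow (mappa : List String) (r : Int) : List Char := (mappa.getD r.toNat "").toList
-- one wrapped move of the deterministic scan A performs
def pvNext (dr dc : Int) (mappa : List String) (p : Int × Int) : Int × Int :=
  let rn := (p.1 + dr).emod ((mappa.length : Int))
  (rn, (p.2 + dc).emod (((pvRow mappa rn).length : Int)))
def pvCell (mappa : List String) (p : Int × Int) : Char := (pvRow mappa p.1).getD p.2.toNat ' '

-- Pre_step holds exactly when Python A returns a triple: facing indexes the delta list, the map is
-- nonempty, and the straight wrapped scan meets a cell in ">v<^.#" — every visited row nonempty and
-- only blanks before it — within the pigeonhole bound pvFuel.  It excludes only inputs where A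
-- raises (IndexError for facing outside [-4,3]; ZeroDivisionError on an empty map or a visited
-- empty row; RecursionError on an all-blank cycle) or falls through to `return None`, which is not
-- a value of the declared triple type.
def Pre_step (row : Int) (col : Int) (facing : Int) (mappa : List String) : Prop :=
  mappa ≠ [] ∧ -4 ≤ facing ∧ facing < 4 ∧
  ∃ j < pvFuel mappa,
    (∀ i ≤ j, 0 < (pvRow mappa
        (((pvNext (pvDelta facing).1 (pvDelta facing).2 mappa)^[i+1] (row, col)).1)).length) ∧
    (∀ i < j, pvCell mappa ((pvNext (pvDelta facing).1 (pvDelta facing).2 mappa)^[i+1] (row, col)) = ' ') ∧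
    pvStop (pvCell mappa ((pvNext (pvDelta facing).1 (pvDelta facing).2 mappa)^[j+1] (row, col))) = true

instance (row : Int) (col : Int) (facing : Int) (mappa : List String) : Decidable (Pre_step row col facing mappa) := by
  unfold Pre_step; infer_instance

def pvWitness_step : Int × Int × Int × List String := (0, 0, 0, ["."])

def Spec_step (row : Int) (col : Int) (facing : Int) (mappa : List String) (out : Int × Int × Bool) : Prop := out = step_alt row col facing mappa
instance (row : Int) (col : Int) (facing : Int) (mappa : List String) (out : Int × Int × Bool) : Decidable (Spec_step row col facing mappa out) := by unfold Spec_step; infer_instance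

-- ===== CLAIM (what is proved, stated in full; the proofs are below) =====
def Claim_equal_step : Prop := ∀ (row : Int) (col : Int) (facing : Int) (mappa : List String), Dom_step row col facing mappa → Pre_step row col facing mappa → Spec_step row col facing mappa (step row col facing mappa)

-- ===== LEMMAS AND PROOFS =====

-- On a stuck result A hands back exactly its own call arguments.
theorem stepACore_true (fuel : Nat) (r c facing : Int) (mappa : List String) (x y : Int)
    (h : stepACore fuel r c facing mappa = (x, y, true)) : x = r ∧ y = c := by
  cases fuel with
  | zero => simp [stepACore] at h
  | succ f =>
    simp only [stepACore] at h
    cases hg : PySem.List.pyGet? [((1 : Int), (0 : Int)), (0, 1), (-1, 0), (0, -1)] facing with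
    | none => rw [hg] at h; simp at h
    | some d =>
      obtain ⟨dx, dy⟩ := d
      rw [hg] at h
      simp only at h
      cases hr : PySem.List.pyGet? mappa (PySem.Int.mod (r + dy) ((mappa.length : Int))) with
      | none => rw [hr] at h; simp at h
      | some srow =>
        rw [hr] at h
        simp only at h
        cases hc : PySem.Str.pyGet? srow (PySem.Int.mod (c + dx) (PySem.Str.len srow)) with
        | none => rw [hc] at h; simp at h
        | some ch =>
          rw [hc] at h
          simp only at h
          split_ifs at h with h1 h2 h3 h4
          · simp at h
          · simp only [Prod.mk.injEq, and_true] at h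
            exact ⟨h.1.symm, h.2.symm⟩
          · simp only [Prod.mk.injEq, and_true] at h
            exact ⟨h.1.symm, h.2.symm⟩
          · simp only [Prod.mk.injEq] at h
            exact absurd h.2.2 h4
          · simp at h

def pvRemap (row0 col0 : Int) (v : Int × Int × Bool) : Int × Int × Bool :=
  if v.2.2 then (row0, col0, true) else v

theorem loop_eq (fuel : Nat) (dx dy row0 col0 : Int) (facing : Int) (mappa : List String)
    (hd : PySem.List.pyGet? [((1 : Int), (0 : Int)), (0, 1), (-1, 0), (0, -1)] facing = some (dx, dy)) :
    ∀ r c, stepBLoop fuel dy dx row0 col0 r c mappa = pvRemap row0 col0 (stepACore fuel r c facing mappa) := by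
  induction fuel with
  | zero => intro r c; simp [stepBLoop, stepACore, pvRemap]
  | succ f ih =>
    intro r c
    simp only [stepBLoop, stepACore, hd]
    cases hr : PySem.List.pyGet? mappa (PySem.Int.mod (r + dy) ((mappa.length : Int))) with
    | none => simp [pvRemap]
    | some srow =>
      simp only
      cases hc : PySem.Str.pyGet? srow (PySem.Int.mod (c + dx) (PySem.Str.len srow)) with
      | none => simp [pvRemap]
      | some ch =>
        simp only
        by_cases h1 : ch = ' '
        · subst h1
          rw [if_neg (by decide : ¬((['>', 'v', '<', '^', '.'].contains ' ') = true)),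
              if_neg (by decide : ¬(' ' = '#')), if_pos rfl, if_pos rfl]
          rw [ih]
          rcases hrec : stepACore f (PySem.Int.mod (r + dy) ((mappa.length : Int)))
              (PySem.Int.mod (c + dx) (PySem.Str.len srow)) facing mappa with ⟨a, b, st⟩
          cases st <;> simp [pvRemap]
        · rw [if_neg h1]
          by_cases h2 : ch = '#'
          · subst h2
            rw [if_neg (by decide : ¬((['>', 'v', '<', '^', '.'].contains '#') = true)),
                if_pos rfl, if_pos rfl]
            simp [pvRemap]
          · rw [if_neg h2]
            by_cases h3 : (['>', 'v', '<', '^', '.'].contains ch) = true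
            · rw [if_pos h3, if_pos h3]
              simp [pvRemap]
            · rw [if_neg h3, if_neg h3, if_neg h2, if_neg h1]
              simp [pvRemap]

-- combined: the B loop started at the original position IS A, for a matching delta
theorem key (row col facing : Int) (mappa : List String) (dx dy : Int)
    (hd : PySem.List.pyGet? [((1 : Int), (0 : Int)), (0, 1), (-1, 0), (0, -1)] facing = some (dx, dy)) :
    stepBLoop (pvFuel mappa) dy dx row col row col mappa = step row col facing mappa := by
  rw [loop_eq (pvFuel mappa) dx dy row col facing mappa hd row col]
  show pvRemap row col (stepACore (pvFuel mappa) row col facing mappa) = step row col facing mappa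
  rcases hv : stepACore (pvFuel mappa) row col facing mappa with ⟨x, y, st⟩
  cases st with
  | false => simp [pvRemap, step, hv]
  | true =>
    obtain ⟨hx, hy⟩ := stepACore_true _ _ _ _ _ _ _ hv
    simp [pvRemap, step, hv, hx, hy]

-- ===== VERDICT (by name: the statement is the Claim_ definition above) =====
theorem step_spec : Claim_equal_step := by
  intro row col facing mappa _ hPre
  obtain ⟨-, hlo, hhi, -⟩ := hPre
  show step row col facing mappa = step_alt row col facing mappa
  interval_cases facing <;>
    simp only [step_alt] <;>
    norm_num <;>
    exact (key _ _ _ _ _ _ (by decide)).symm
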